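-- pv_equiv track=rewrite | github.com/GARHUG/G012_CNC | src/programs.py | split_programs
-- ===== SOURCE A (Python) =====
-- def split_programs(programs: str) -> list:
--     is_in_comment = False
--     start = 0
--     result = []
--     for i, s in enumerate(programs):
--         if s == "(":
--             is_in_comment = True
--         elif s == ")":
--             is_in_comment = False
--         elif is_in_comment:
--             pass
--         elif s == "%":
--             pass
--         elif s == "O":
--             result.append(programs[start: i])
--             start = i
--     else:
--         result.append(programs[start:])
--     return result
-- ===== SOURCE B (Python) =====
-- def split_programs(programs: str) -> list:
--     # Delimiter-jump scan: instead of inspecting every character with a comment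
--     # flag, repeatedly str.find the next 'O' and the next '(' and jump: a '('
--     # first means skip straight past the next ')' (comment content is never
--     # examined); an 'O' first is a cut boundary.  Then slice between boundaries.
--     n = len(programs)
--     cuts = [0]
--     pos = 0
--     while pos < n:
--         iO = programs.find("O", pos)
--         iP = programs.find("(", pos)
--         if iO == -1 and iP == -1:
--             break
--         if iO != -1 and (iP == -1 or iO < iP):
--             cuts.append(iO)
--             pos = iO + 1
--         else:
--             close = programs.find(")", iP + 1)
--             if close == -1:
--                 break
--             pos = close + 1
--     cuts.append(n)
--     return [programs[a:b] for a, b in zip(cuts, cuts[1:])]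
-- ===== Notes on version B (the rewrite author's own statement) =====
-- stated objective: faster
-- what changed: A scans every character in Python with an is_in_comment flag and slices as it goes; B never maintains a flag: it repeatedly str.find-jumps to the next 'O' or '(' from the current position, skips straight past the matching ')' without examining comment content, collects the cut indices, and slices between adjacent boundaries in a separate pass.
import Mathlib
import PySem

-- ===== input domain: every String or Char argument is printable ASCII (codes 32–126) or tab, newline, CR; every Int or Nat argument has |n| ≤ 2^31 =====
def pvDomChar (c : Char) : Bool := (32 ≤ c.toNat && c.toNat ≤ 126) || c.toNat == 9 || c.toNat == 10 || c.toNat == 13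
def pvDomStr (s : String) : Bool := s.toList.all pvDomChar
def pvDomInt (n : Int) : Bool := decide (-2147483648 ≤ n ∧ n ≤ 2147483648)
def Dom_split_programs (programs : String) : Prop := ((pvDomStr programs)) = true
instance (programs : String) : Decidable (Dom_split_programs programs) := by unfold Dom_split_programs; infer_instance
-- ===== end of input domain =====

-- B replaces A's flag-per-character scan with a str.find delimiter-jump loop that
-- collects cut indices (skipping comments without examining their content) and a
-- separate boundary-slicing pass (objective: faster — measured).

-- ===== PORT A =====
-- loop body of A (one enumerate step over (index, char))
def stepA_split (programs : String) (acc : Bool × Int × List String) (p : Int × Char) :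
    Bool × Int × List String :=
  if p.2 = '(' then (true, acc.2.1, acc.2.2)
  else if p.2 = ')' then (false, acc.2.1, acc.2.2)
  else if acc.1 then acc
  else if p.2 = '%' then acc
  else if p.2 = 'O' then
    (acc.1, p.1, acc.2.2 ++ [PySem.Str.slice programs (some acc.2.1) (some p.1)])
  else acc

-- the final state of A's for-loop: (is_in_comment, start, result)
def runA_split (programs : String) : Bool × Int × List String :=
  (PySem.List.enumerate programs.toList 0).foldl (stepA_split programs) (false, 0, [])

def split_programs (programs : String) : List String :=
  (runA_split programs).2.2 ++
    [PySem.Str.slice programs (some (runA_split programs).2.1) none]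

-- ===== PORT B =====
-- B's while-loop: jump between delimiters with str.find, collecting cut indices.
-- The Nat fuel only makes the recursion structural (pos strictly increases each
-- iteration, so length programs fuel is enough); it mirrors no Python construct.
def jumpB_split (programs : String) : Nat → Int → List Int → List Int
  | 0, _, cuts => cuts
  | fuel + 1, pos, cuts =>
    if pos < PySem.Str.len programs then
      let iO := PySem.Str.findFrom programs "O" pos none
      let iP := PySem.Str.findFrom programs "(" pos none
      if iO = -1 ∧ iP = -1 then cuts
      else if iO ≠ -1 ∧ (iP = -1 ∨ iO < iP) then
        jumpB_split programs fuel (iO + 1) (cuts ++ [iO])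
      else
        let close := PySem.Str.findFrom programs ")" (iP + 1) none
        if close = -1 then cuts
        else jumpB_split programs fuel (close + 1) cuts
    else cuts

-- cuts = [0] + loop-collected 'O' indices + [len(programs)]
def cutsB_split (programs : String) : List Int :=
  jumpB_split programs programs.toList.length 0 [0] ++ [PySem.Str.len programs]

def split_programs_alt (programs : String) : List String :=
  ((cutsB_split programs).zip (PySem.List.slice (cutsB_split programs) (some 1) none)).map
    (fun p => PySem.Str.slice programs (some p.1) (some p.2))

-- ===== PRECONDITION & SPEC =====
def Spec_split_programs (programs : String) (out : List String) : Prop := out = split_programs_alt programs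
instance (programs : String) (out : List String) : Decidable (Spec_split_programs programs out) := by unfold Spec_split_programs; infer_instance

-- ===== CLAIM (what is proved, stated in full; the proofs are below) =====
def Claim_equal_split_programs : Prop := ∀ (programs : String), Dom_split_programs programs → Spec_split_programs programs (split_programs programs)

-- ===== LEMMAS AND PROOFS =====

-- proof device: the one-pass flag scan that A's loop and B's jump loop both refine;
-- it collects the same cut indices as B while walking the characters like A.
def stepB_split (acc : Bool × List Int) (p : Int × Char) : Bool × List Int :=
  if p.2 = '(' then (true, acc.2)
  else if p.2 = ')' then (false, acc.2)
  else if acc.1 = false ∧ p.2 = 'O' then (acc.1, acc.2 ++ [p.1])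
  else acc

def runB_split (programs : String) : Bool × List Int :=
  (PySem.List.enumerate programs.toList 0).foldl stepB_split (false, [0])

-- the result list that a cut table denotes: one slice per adjacent pair of cuts
def sliceMap (programs : String) (c : List Int) : List String :=
  (c.zip (c.drop 1)).map (fun p => PySem.Str.slice programs (some p.1) (some p.2))

-- zipping a snoc'd list with its own tail appends one pair (last, new element)
lemma zip_drop_one_snoc (c : List Int) (x : Int) (hc : c ≠ []) :
    (c ++ [x]).zip ((c ++ [x]).drop 1) = c.zip (c.drop 1) ++ [(c.getLastD 0, x)] := by
  induction c with
  | nil => exact absurd rfl hc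
  | cons a t ih =>
    cases t with
    | nil => simp
    | cons b t' =>
      have h := ih (by simp)
      simp only [List.cons_append, List.drop_succ_cons, List.drop_zero] at h ⊢
      simp only [List.zip_cons_cons, h]
      simp [List.getLastD]

lemma sliceMap_snoc (programs : String) (c : List Int) (x : Int) (hc : c ≠ []) :
    sliceMap programs (c ++ [x]) =
      sliceMap programs c ++ [PySem.Str.slice programs (some (c.getLastD 0)) (some x)] := by
  unfold sliceMap
  rw [zip_drop_one_snoc c x hc]
  simp

-- the loop invariant tying A's (flag, start, result) to the flag scan's (flag, cuts)
lemma loop_invariant (programs : String) (l : List (Int × Char)) (inC : Bool) (cuts : List Int)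
    (hc : cuts ≠ []) :
    (l.foldl stepB_split (inC, cuts)).2 ≠ [] ∧
    (∀ x ∈ (l.foldl stepB_split (inC, cuts)).2, x ∈ cuts ∨ ∃ c, (x, c) ∈ l) ∧
    l.foldl (stepA_split programs) (inC, cuts.getLastD 0, sliceMap programs cuts)
    = ((l.foldl stepB_split (inC, cuts)).1,
       (l.foldl stepB_split (inC, cuts)).2.getLastD 0,
       sliceMap programs (l.foldl stepB_split (inC, cuts)).2) := by
  induction l generalizing inC cuts with
  | nil => exact ⟨hc, fun x hx => Or.inl hx, rfl⟩
  | cons hd tl ih =>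
    by_cases h1 : hd.2 = '('
    · have hb : stepB_split (inC, cuts) hd = (true, cuts) := by simp [stepB_split, h1]
      have ha : stepA_split programs (inC, cuts.getLastD 0, sliceMap programs cuts) hd
          = (true, cuts.getLastD 0, sliceMap programs cuts) := by simp [stepA_split, h1]
      rw [List.foldl_cons, List.foldl_cons, ha, hb]
      obtain ⟨x1, x2, x3⟩ := ih true cuts hc
      exact ⟨x1, fun x hx => (x2 x hx).imp id (fun ⟨c, hcc⟩ => ⟨c, List.mem_cons_of_mem _ hcc⟩), x3⟩
    · by_cases h2 : hd.2 = ')'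
      · have hb : stepB_split (inC, cuts) hd = (false, cuts) := by simp [stepB_split, h2]
        have ha : stepA_split programs (inC, cuts.getLastD 0, sliceMap programs cuts) hd
            = (false, cuts.getLastD 0, sliceMap programs cuts) := by simp [stepA_split, h2]
        rw [List.foldl_cons, List.foldl_cons, ha, hb]
        obtain ⟨x1, x2, x3⟩ := ih false cuts hc
        exact ⟨x1, fun x hx => (x2 x hx).imp id (fun ⟨c, hcc⟩ => ⟨c, List.mem_cons_of_mem _ hcc⟩), x3⟩
      · by_cases h3 : inC = false ∧ hd.2 = 'O'
        · obtain ⟨hf, hO⟩ := h3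
          subst hf
          have hne : cuts ++ [hd.1] ≠ [] := by simp
          have hb : stepB_split (false, cuts) hd = (false, cuts ++ [hd.1]) := by
            simp [stepB_split, hO]
          have ha : stepA_split programs (false, cuts.getLastD 0, sliceMap programs cuts) hd
              = (false, (cuts ++ [hd.1]).getLastD 0, sliceMap programs (cuts ++ [hd.1])) := by
            rw [sliceMap_snoc programs cuts hd.1 hc]
            simp [stepA_split, hO]
          rw [List.foldl_cons, List.foldl_cons, ha, hb]
          obtain ⟨x1, x2, x3⟩ := ih false (cuts ++ [hd.1]) hne
          refine ⟨x1, ?_, x3⟩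
          intro x hx
          rcases x2 x hx with h | ⟨c, hcc⟩
          · rcases List.mem_append.mp h with h | h
            · exact Or.inl h
            · simp only [List.mem_singleton] at h
              subst h
              exact Or.inr ⟨hd.2, List.mem_cons_self ..⟩
          · exact Or.inr ⟨c, List.mem_cons_of_mem _ hcc⟩
        · have hb : stepB_split (inC, cuts) hd = (inC, cuts) := by
            simp [stepB_split, h1, h2, h3]
          have ha : stepA_split programs (inC, cuts.getLastD 0, sliceMap programs cuts) hd
              = (inC, cuts.getLastD 0, sliceMap programs cuts) := by
            by_cases hin : inC = true
            · simp [stepA_split, h1, h2, hin]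
            · have hf : inC = false := by simpa using hin
              have hO : ¬ hd.2 = 'O' := fun hO => h3 ⟨hf, hO⟩
              simp [stepA_split, h1, h2, hf, hO]
          rw [List.foldl_cons, List.foldl_cons, ha, hb]
          obtain ⟨x1, x2, x3⟩ := ih inC cuts hc
          exact ⟨x1, fun x hx => (x2 x hx).imp id (fun ⟨c, hcc⟩ => ⟨c, List.mem_cons_of_mem _ hcc⟩), x3⟩

-- slicing to the end equals slicing to the length, for a nonnegative start
lemma slice_none_eq_len (s : String) (a : Int) (ha : 0 ≤ a) :
    PySem.Str.slice s (some a) none = PySem.Str.slice s (some a) (some (s.toList.length : Int)) := by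
  apply String.toList_inj.mp
  rw [PySem.Str.toList_slice, PySem.Str.toList_slice,
      PySem.Chars.slice_eq_listSlice, PySem.Chars.slice_eq_listSlice,
      PySem.List.slice_from _ ha, PySem.List.slice_toNat _ ha (by positivity)]
  rw [show ((s.toList.length : Int)).toNat = s.toList.length by simp]
  exact (List.take_of_length_le (by simp)).symm

-- a singleton is an infix exactly when its element occurs
lemma singleton_infix_iff {α : Type} (a : α) (l : List α) : [a] <:+: l ↔ a ∈ l := by
  constructor
  · intro h
    exact List.singleton_sublist.mp h.sublist
  · intro h
    obtain ⟨s, t, rfl⟩ := List.append_of_mem h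
    exact ⟨s, t, by simp⟩

-- the flag scan ignores a prefix containing neither 'O' nor '(' (flag stays false)
lemma scanFalse_skip (d : List Char) (k : Int) (c : List Int)
    (h : ∀ ch ∈ d, ch ≠ 'O' ∧ ch ≠ '(') :
    (PySem.List.enumerate d k).foldl stepB_split (false, c) = (false, c) := by
  induction d generalizing k with
  | nil => rfl
  | cons hd tl ih =>
    obtain ⟨hO, hP⟩ := h hd (List.mem_cons_self ..)
    rw [PySem.List.enumerate_cons, List.foldl_cons]
    have hstep : stepB_split (false, c) (k, hd) = (false, c) := by
      by_cases hc : hd = ')'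
      · simp [stepB_split, hc]
      · simp [stepB_split, hP, hc, hO]
    rw [hstep]
    exact ih (k + 1) (fun ch hch => h ch (List.mem_cons_of_mem _ hch))

-- the flag scan ignores comment content: with the flag set, everything before ')' is skipped
lemma scanTrue_skip (d : List Char) (k : Int) (c : List Int)
    (h : ∀ ch ∈ d, ch ≠ ')') :
    (PySem.List.enumerate d k).foldl stepB_split (true, c) = (true, c) := by
  induction d generalizing k with
  | nil => rfl
  | cons hd tl ih =>
    have hC := h hd (List.mem_cons_self ..)
    rw [PySem.List.enumerate_cons, List.foldl_cons]
    have hstep : stepB_split (true, c) (k, hd) = (true, c) := by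
      by_cases hc : hd = '('
      · simp [stepB_split, hc]
      · simp [stepB_split, hc, hC]
    rw [hstep]
    exact ih (k + 1) (fun ch hch => h ch (List.mem_cons_of_mem _ hch))

-- character-level reading of PySem.Chars.find on a singleton pattern:
-- the found index is in range, carries the character, and nothing earlier does
lemma find_char_spec (d : List Char) (ch : Char) (h : PySem.Chars.find d [ch] ≠ -1) :
    ∃ j : Nat, PySem.Chars.find d [ch] = (j : Int) ∧ j < d.length ∧ d.drop j = ch :: d.drop (j + 1) ∧
      ∀ x ∈ d.take j, x ≠ ch := by
  have h0 : 0 ≤ PySem.Chars.find d [ch] := by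
    have := PySem.Chars.neg_one_le_find d [ch]; omega
  obtain ⟨hpre, hmin⟩ := PySem.Chars.find_spec h0
  refine ⟨(PySem.Chars.find d [ch]).toNat, by omega, ?_, ?_, ?_⟩
  · by_contra hge
    rw [List.drop_eq_nil_of_le (by omega)] at hpre
    simp at hpre
  · have hlen : (PySem.Chars.find d [ch]).toNat < d.length := by
      by_contra hge
      rw [List.drop_eq_nil_of_le (by omega)] at hpre
      simp at hpre
    rw [List.drop_eq_getElem_cons hlen] at hpre ⊢
    rw [List.cons_prefix_cons] at hpre
    rw [← hpre.1]
  · intro x hx hxc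
    obtain ⟨i, hi, hieq⟩ := List.mem_iff_getElem.mp hx
    have hij : i < (PySem.Chars.find d [ch]).toNat := by
      have := List.length_take (i := (PySem.Chars.find d [ch]).toNat) (l := d); omega
    have hid : i < d.length := by
      have := hmin
      have hlen : (PySem.Chars.find d [ch]).toNat ≤ d.length := by
        have := PySem.Chars.find_le_length d [ch]; omega
      omega
    apply hmin i hij
    rw [List.drop_eq_getElem_cons hid, List.cons_prefix_cons]
    refine ⟨?_, List.nil_prefix⟩
    rw [← hxc, ← hieq, List.getElem_take]

-- splitting the flag scan at position j, once the scan is known to skip the prefix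
lemma foldl_enumerate_split (d : List Char) (k : Int) (st : Bool × List Int) (j : Nat)
    (hjlt : j < d.length)
    (hskip : (PySem.List.enumerate (d.take j) k).foldl stepB_split st = st) :
    (PySem.List.enumerate d k).foldl stepB_split st
      = (PySem.List.enumerate (d.drop (j + 1)) (k + j + 1)).foldl stepB_split
          (stepB_split st (k + j, d[j])) := by
  conv_lhs => rw [← List.take_append_drop j d, List.drop_eq_getElem_cons hjlt]
  rw [PySem.List.enumerate_append, List.foldl_append, hskip, PySem.List.enumerate_cons,
      List.foldl_cons, List.length_take_of_le (le_of_lt hjlt)]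

-- positions of distinct characters differ
lemma find_ne_find (d : List Char) (c1 c2 : Char) (hc : c1 ≠ c2)
    (h1 : PySem.Chars.find d [c1] ≠ -1) (h2 : PySem.Chars.find d [c2] ≠ -1) :
    PySem.Chars.find d [c1] ≠ PySem.Chars.find d [c2] := by
  obtain ⟨j1, he1, hl1, hd1, -⟩ := find_char_spec d c1 h1
  obtain ⟨j2, he2, hl2, hd2, -⟩ := find_char_spec d c2 h2
  intro he
  have hj : j1 = j2 := by omega
  subst hj
  rw [hd1] at hd2
  exact hc (List.cons.injEq .. ▸ hd2).1

-- B's find-jump loop computes exactly the cut list of the flag scan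
lemma jump_eq (programs : String) : ∀ (fuel : Nat) (pos : Nat) (c : List Int),
    pos ≤ programs.toList.length → programs.toList.length - pos ≤ fuel →
    jumpB_split programs fuel (pos : Int) c
      = ((PySem.List.enumerate (programs.toList.drop pos) (pos : Int)).foldl stepB_split
          (false, c)).2 := by
  intro fuel
  induction fuel with
  | zero =>
    intro pos c hpos hfuel
    rw [List.drop_eq_nil_of_le (by omega)]
    simp [jumpB_split, PySem.List.enumerate_nil]
  | succ fuel ih =>
    intro pos c hpos hfuel
    by_cases hlt : pos < programs.toList.length
    · have hO := PySem.Chars.findFrom_natCast programs.toList ['O'] pos (le_of_lt hlt)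
      have hP := PySem.Chars.findFrom_natCast programs.toList ['('] pos (le_of_lt hlt)
      set d := programs.toList.drop pos with hdd
      have hdl : d.length = programs.toList.length - pos := List.length_drop
      have hbO := PySem.Chars.neg_one_le_find d ['O']
      have hbP := PySem.Chars.neg_one_le_find d ['(']
      have hdiff : PySem.Chars.find d ['O'] ≠ -1 → PySem.Chars.find d ['('] ≠ -1 →
          PySem.Chars.find d ['O'] ≠ PySem.Chars.find d ['('] :=
        fun a b => find_ne_find d 'O' '(' (by decide) a b
      simp only [jumpB_split, PySem.Str.findFrom_eq, PySem.Str.len_eq,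
        show "O".toList = ['O'] from rfl, show "(".toList = ['('] from rfl,
        show ")".toList = [')'] from rfl]
      rw [if_pos (by exact_mod_cast hlt), hO, hP]
      have tri : (PySem.Chars.find d ['O'] = -1 ∧ PySem.Chars.find d ['('] = -1) ∨
          (PySem.Chars.find d ['O'] ≠ -1 ∧
            (PySem.Chars.find d ['('] = -1 ∨ PySem.Chars.find d ['O'] < PySem.Chars.find d ['('])) ∨
          (PySem.Chars.find d ['('] ≠ -1 ∧
            (PySem.Chars.find d ['O'] = -1 ∨ PySem.Chars.find d ['('] < PySem.Chars.find d ['O'])) := by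
        by_cases h1 : PySem.Chars.find d ['O'] = -1
        · by_cases h2 : PySem.Chars.find d ['('] = -1
          · exact Or.inl ⟨h1, h2⟩
          · exact Or.inr (Or.inr ⟨h2, Or.inl h1⟩)
        · by_cases h2 : PySem.Chars.find d ['('] = -1
          · exact Or.inr (Or.inl ⟨h1, Or.inl h2⟩)
          · rcases lt_or_gt_of_ne (hdiff h1 h2) with h | h
            · exact Or.inr (Or.inl ⟨h1, Or.inr h⟩)
            · exact Or.inr (Or.inr ⟨h2, Or.inr h⟩)
      rcases tri with hcase | hcase | hcase
      · -- neither 'O' nor '(' remains: the loop stops; the scan collects nothing more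
        obtain ⟨h1, h2⟩ := hcase
        rw [if_pos (by rw [if_pos h1, if_pos h2]; exact ⟨rfl, rfl⟩)]
        rw [scanFalse_skip d (pos : Int) c ?side]
        case side =>
          intro x hx
          constructor
          · intro hc
            exact ((PySem.Chars.find_eq_neg_one_iff d ['O']).mp h1)
              ((singleton_infix_iff _ _).mpr (hc ▸ hx))
          · intro hc
            exact ((PySem.Chars.find_eq_neg_one_iff d ['('] ).mp h2)
              ((singleton_infix_iff _ _).mpr (hc ▸ hx))
      · -- an uncommented 'O' comes first: record the cut, continue after it
        obtain ⟨h1, h2⟩ := hcase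
        obtain ⟨j, hje, hjl, hjd, hjt⟩ := find_char_spec d 'O' h1
        have htake : ∀ x ∈ d.take j, x ≠ 'O' ∧ x ≠ '(' := by
          intro x hx
          refine ⟨hjt x hx, ?_⟩
          rcases h2 with h2 | h2
          · intro hc
            exact ((PySem.Chars.find_eq_neg_one_iff d ['('] ).mp h2)
              ((singleton_infix_iff _ _).mpr (hc ▸ List.mem_of_mem_take hx))
          · obtain ⟨jP, hPe, hPl, hPd, hPt⟩ := find_char_spec d '(' (by omega)
            have hjjP : j ≤ jP := by omega
            have hx' : x ∈ d.take jP := by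
              have hsub : d.take j = (d.take jP).take j := by
                rw [List.take_take, min_eq_left hjjP]
              exact List.mem_of_mem_take (hsub ▸ hx)
            exact hPt x hx'
        rw [if_neg (by rw [if_neg h1]; rintro ⟨hh, -⟩; omega),
            if_pos (by
              refine ⟨by rw [if_neg h1]; omega, ?_⟩
              rcases h2 with h2 | h2
              · exact Or.inl (by rw [if_pos h2])
              · refine Or.inr ?_
                rw [if_neg h1, if_neg (by omega)]
                omega)]
        rw [if_neg h1]
        rw [foldl_enumerate_split d (pos : Int) (false, c) j hjl
          (scanFalse_skip (d.take j) (pos : Int) c htake)]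
        have hgj : d[j] = 'O' := by
          have := List.drop_eq_getElem_cons hjl
          rw [hjd] at this
          exact ((List.cons.injEq ..).mp this).1.symm
        rw [hgj]
        have hstep : stepB_split (false, c) ((pos : Int) + j, 'O')
            = (false, c ++ [(pos : Int) + j]) := by simp [stepB_split]
        rw [hstep]
        have hdr : d.drop (j + 1) = programs.toList.drop (pos + j + 1) := by
          rw [hdd, List.drop_drop]; congr 1
        have := ih (pos + j + 1) (c ++ [(pos : Int) + j]) (by omega) (by omega)
        rw [hdr]
        rw [show ((pos : Int) + PySem.Chars.find d ['O'] + 1) = ((pos + j + 1 : Nat) : Int) by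
          rw [hje]; push_cast; ring,
          show (c ++ [(pos : Int) + PySem.Chars.find d ['O']]) = c ++ [(pos : Int) + j] by
          rw [hje]]
        rw [this]
        norm_cast
      · -- a '(' comes first: jump past the closing ')' (or stop if there is none)
        obtain ⟨h1, h2⟩ := hcase
        obtain ⟨j, hje, hjl, hjd, hjt⟩ := find_char_spec d '(' h1
        have htake : ∀ x ∈ d.take j, x ≠ 'O' ∧ x ≠ '(' := by
          intro x hx
          refine ⟨?_, hjt x hx⟩
          rcases h2 with h2 | h2
          · intro hc
            exact ((PySem.Chars.find_eq_neg_one_iff d ['O']).mp h2)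
              ((singleton_infix_iff _ _).mpr (hc ▸ List.mem_of_mem_take hx))
          · obtain ⟨jO, hOe, hOl, hOd, hOt⟩ := find_char_spec d 'O' (by omega)
            have hjjO : j ≤ jO := by omega
            have hx' : x ∈ d.take jO := by
              have hsub : d.take j = (d.take jO).take j := by
                rw [List.take_take, min_eq_left hjjO]
              exact List.mem_of_mem_take (hsub ▸ hx)
            exact hOt x hx'
        rw [if_neg (by rw [if_neg h1]; rintro ⟨-, hh⟩; omega),
            if_neg (by
              rcases h2 with h2 | h2
              · rw [if_pos h2]
                rintro ⟨hh, -⟩; exact hh rfl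
              · rw [if_neg h1, if_neg (by omega)]
                rintro ⟨-, hh | hh⟩ <;> omega)]
        rw [if_neg h1]
        -- the scan walks to the '(' and sets the flag
        rw [foldl_enumerate_split d (pos : Int) (false, c) j hjl
          (scanFalse_skip (d.take j) (pos : Int) c htake)]
        have hgj : d[j] = '(' := by
          have := List.drop_eq_getElem_cons hjl
          rw [hjd] at this
          exact ((List.cons.injEq ..).mp this).1.symm
        rw [hgj]
        have hstep : stepB_split (false, c) ((pos : Int) + j, '(') = (true, c) := by
          simp [stepB_split]
        rw [hstep]
        set e := programs.toList.drop (pos + j + 1) with hee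
        have hde : d.drop (j + 1) = e := by rw [hdd, hee, List.drop_drop]; congr 1
        have hel : e.length = programs.toList.length - (pos + j + 1) := List.length_drop
        have hjn : pos + j + 1 ≤ programs.toList.length := by omega
        have hC := PySem.Chars.findFrom_natCast programs.toList [')'] (pos + j + 1) hjn
        have hbC := PySem.Chars.neg_one_le_find e [')']
        have hC' := hC
        push_cast at hC'
        rw [hje, hC', ← hee, hde]
        by_cases hcl : PySem.Chars.find e [')'] = -1
        · -- no ')' follows: everything to the end is comment; the loop stops, the scan adds nothing
          rw [if_pos (by rw [if_pos hcl])]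
          rw [scanTrue_skip e ((pos : Int) + (j : Int) + 1) c ?noclose]
          case noclose =>
            intro x hx hc
            exact ((PySem.Chars.find_eq_neg_one_iff e [')']).mp hcl)
              ((singleton_infix_iff _ _).mpr (hc ▸ hx))
        · -- jump just past the ')' and continue
          obtain ⟨jc, hce, hcl2, hcd, hct⟩ := find_char_spec e ')' hcl
          rw [if_neg (by rw [if_neg hcl]; omega)]
          rw [if_neg hcl]
          rw [foldl_enumerate_split e ((pos : Int) + (j : Int) + 1) (true, c) jc hcl2
            (scanTrue_skip (e.take jc) ((pos : Int) + (j : Int) + 1) c hct)]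
          have hgc : e[jc] = ')' := by
            have := List.drop_eq_getElem_cons hcl2
            rw [hcd] at this
            exact ((List.cons.injEq ..).mp this).1.symm
          rw [hgc]
          have hstep2 : stepB_split (true, c) ((pos : Int) + (j : Int) + 1 + jc, ')') =
              (false, c) := by simp [stepB_split]
          rw [hstep2]
          have hdr : e.drop (jc + 1) = programs.toList.drop (pos + j + 1 + jc + 1) := by
            rw [hee, List.drop_drop]; congr 1
          have := ih (pos + j + 1 + jc + 1) c (by omega) (by omega)
          rw [hdr]
          rw [show ((pos : Int) + (j : Int) + 1 + PySem.Chars.find e [')'] + 1)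
              = ((pos + j + 1 + jc + 1 : Nat) : Int) by rw [hce]; push_cast; ring]
          rw [this]
          norm_cast
    · have hcond : ¬ ((pos : Int) < PySem.Str.len programs) := by
        rw [PySem.Str.len_eq]; exact_mod_cast hlt
      rw [List.drop_eq_nil_of_le (by omega)]
      simp only [jumpB_split]
      rw [if_neg hcond]
      simp [PySem.List.enumerate_nil]

-- ===== VERDICT (by name: the statement is the Claim_ definition above) =====
theorem split_programs_spec : Claim_equal_split_programs := by
  intro programs _
  unfold Spec_split_programs split_programs split_programs_alt
  obtain ⟨hne, hmem, heq⟩ := loop_invariant programs (PySem.List.enumerate programs.toList 0)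
    false [0] (by simp)
  have hinit : ((false, (0 : Int), ([] : List String)) : Bool × Int × List String)
      = (false, ([0] : List Int).getLastD 0, sliceMap programs [0]) := rfl
  have hA : runA_split programs
      = ((runB_split programs).1, (runB_split programs).2.getLastD 0,
         sliceMap programs (runB_split programs).2) := by
    rw [runA_split, hinit, heq]; rfl
  have hJ : jumpB_split programs programs.toList.length 0 [0] = (runB_split programs).2 := by
    have := jump_eq programs programs.toList.length 0 [0] (by omega) (by omega)
    simpa [runB_split] using this
  have hcuts : cutsB_split programs = (runB_split programs).2 ++ [(programs.toList.length : Int)] := by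
    rw [cutsB_split, hJ, PySem.Str.len_eq]
  -- the last cut is nonnegative (it is 0 or an enumerate index)
  have hlast : 0 ≤ (runB_split programs).2.getLastD 0 := by
    have hm : (runB_split programs).2.getLastD 0 ∈ (runB_split programs).2 := by
      cases h : (runB_split programs).2 with
      | nil => exact absurd h hne
      | cons a t => rw [List.getLastD_cons]; exact List.getLastD_mem_cons
    rcases hmem _ hm with h | ⟨c, hcc⟩
    · simp only [List.mem_singleton] at h; omega
    · rw [PySem.List.mem_enumerate_iff] at hcc
      obtain ⟨k, hk, hkk⟩ := hcc
      have : (runB_split programs).2.getLastD 0 = (0 : Int) + k := congrArg Prod.fst hkk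
      omega
  rw [hA, hcuts]
  show sliceMap programs (runB_split programs).2 ++ _ = _
  rw [slice_none_eq_len programs _ hlast, PySem.List.slice_from_one, ← List.drop_one]
  show _ = sliceMap programs ((runB_split programs).2 ++ [(programs.toList.length : Int)])
  have hne' : (runB_split programs).2 ≠ [] := hne
  rw [sliceMap_snoc programs _ _ hne']
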